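-- pv_equiv track=rewrite | github.com/toddwbucy/NL_Hecate | docs/reports/generate_ablation_tnt_report.py | latest_run_evals
-- ===== SOURCE A (Python) =====
-- def latest_run_evals(evals: list[dict]) -> list[dict]:
--     """Return the last contiguous monotone-step sequence (handles restarts)."""
--     runs: list[list[dict]] = []
--     current: list[dict] = []
--     for e in evals:
--         if current and e["step"] <= current[-1]["step"]:
--             runs.append(current)
--             current = []
--         current.append(e)
--     if current:
--         runs.append(current)
--     return runs[-1] if runs else current
-- ===== SOURCE B (Python) =====
-- def latest_run_evals(evals: list[dict]) -> list[dict]: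
--     """Return the last contiguous monotone-step sequence (handles restarts)."""
--     run: list[dict] = []
--     for e in reversed(evals):
--         if run and e["step"] >= run[-1]["step"]:
--             break
--         run.append(e)
--     run.reverse()
--     return run
-- ===== Notes on version B (the rewrite author's own statement) =====
-- stated objective: simpler
-- what changed: Replaces A's forward pass that partitions all of evals into a list of runs (keeping every run) with a single backward scan from the end that collects only the trailing strictly-increasing-step run and breaks at its start.
import Mathlib
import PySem

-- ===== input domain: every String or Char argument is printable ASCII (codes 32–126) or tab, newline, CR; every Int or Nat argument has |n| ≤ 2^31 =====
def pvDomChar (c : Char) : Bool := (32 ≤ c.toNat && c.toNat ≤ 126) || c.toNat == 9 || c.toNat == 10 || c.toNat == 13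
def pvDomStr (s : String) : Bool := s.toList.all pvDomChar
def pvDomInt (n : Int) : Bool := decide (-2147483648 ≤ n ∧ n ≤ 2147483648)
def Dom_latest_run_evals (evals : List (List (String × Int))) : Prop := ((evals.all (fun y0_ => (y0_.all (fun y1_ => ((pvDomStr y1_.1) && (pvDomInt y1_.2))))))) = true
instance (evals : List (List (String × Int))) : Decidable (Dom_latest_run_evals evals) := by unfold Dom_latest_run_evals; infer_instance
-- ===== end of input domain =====

-- B replaces A's forward pass that collects every run with a single backward scan that
-- stops at the start of the trailing run (objective: simpler; return value only, no mutation).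

-- ===== PORT A =====
-- e["step"]: first-match lookup in the association list; Pre_ excludes the inputs where the
-- key is missing and Python raises KeyError, so the getD default is never relied on there.
def pvStep (d : List (String × Int)) : Int := (d.lookup "step").getD 0

-- the loop body: if current and e["step"] <= current[-1]["step"]: runs.append(current);
-- current = [] ; then current.append(e)
def pvF (s : List (List (List (String × Int))) × List (List (String × Int)))
    (e : List (String × Int)) : List (List (List (String × Int))) × List (List (String × Int)) :=
  if s.2 ≠ [] ∧ pvStep e ≤ pvStep s.2.getLast! then (s.1 ++ [s.2], [e]) else (s.1, s.2 ++ [e])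

def latest_run_evals (evals : List (List (String × Int))) : List (List (String × Int)) :=
  let p := evals.foldl pvF ([], [])
  let runs := if p.2 ≠ [] then p.1 ++ [p.2] else p.1   -- if current: runs.append(current)
  if runs ≠ [] then runs.getLast! else p.2             -- return runs[-1] if runs else current

-- ===== PORT B =====
-- Source B's loop over reversed(evals); the Lean accumulator is Source B's `run` kept reversed
-- (cons instead of append, head instead of run[-1]), so the final run.reverse() is built in.
def pvAltGo (rev : List (List (String × Int))) (run : List (List (String × Int))) : List (List (String × Int)) :=
  match rev with
  | [] => run
  | e :: rest =>
    match run with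
    | [] => pvAltGo rest [e]
    | r :: _ => if pvStep r ≤ pvStep e then run else pvAltGo rest (e :: run)

def latest_run_evals_alt (evals : List (List (String × Int))) : List (List (String × Int)) :=
  pvAltGo evals.reverse []

-- ===== PRECONDITION & SPEC =====
-- Pre_ excludes exactly the inputs where Python A raises KeyError: two or more dicts and
-- some dict lacking a "step" key (with 0 or 1 dicts A performs no lookup and returns).
def Pre_latest_run_evals (evals : List (List (String × Int))) : Prop :=
  evals.length ≤ 1 ∨ ∀ d ∈ evals, (d.lookup "step").isSome
instance (evals : List (List (String × Int))) : Decidable (Pre_latest_run_evals evals) := by unfold Pre_latest_run_evals; infer_instance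

def pvWitness_latest_run_evals : (List (List (String × Int))) :=
  [[("step", 1)], [("step", 2)], [("step", 0)], [("step", 3)]]

def Spec_latest_run_evals (evals : List (List (String × Int))) (out : List (List (String × Int))) : Prop := out = latest_run_evals_alt evals
instance (evals : List (List (String × Int))) (out : List (List (String × Int))) : Decidable (Spec_latest_run_evals evals out) := by unfold Spec_latest_run_evals; infer_instance

-- ===== CLAIM (what is proved, stated in full; the proofs are below) =====
def Claim_equal_latest_run_evals : Prop := ∀ (evals : List (List (String × Int))), Dom_latest_run_evals evals → Pre_latest_run_evals evals → Spec_latest_run_evals evals (latest_run_evals evals)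

-- ===== LEMMAS AND PROOFS =====

theorem pvLast_concat {α : Type} [Inhabited α] (l : List α) (a : α) : (l ++ [a]).getLast! = a := by
  induction l with
  | nil => rfl
  | cons x xs ih =>
    cases xs with
    | nil => rfl
    | cons y ys =>
      rw [List.cons_append, List.getLast!, List.getLast_cons]
      rw [List.cons_append] at ih
      rw [List.getLast!] at ih
      exact ih

-- The elements of the trailing run taken from the reversed list after having taken `r`.
def pvTake (l : List (List (String × Int))) (r : List (String × Int)) : List (List (String × Int)) :=
  match l with
  | [] => []
  | e :: rest => if pvStep e < pvStep r then e :: pvTake rest e else []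

theorem pvAltGo_eq (l : List (List (String × Int))) :
    ∀ r rs, pvAltGo l (r :: rs) = (pvTake l r).reverse ++ (r :: rs) := by
  induction l with
  | nil => intro r rs; simp [pvAltGo, pvTake]
  | cons e rest ih =>
    intro r rs
    by_cases h : pvStep r ≤ pvStep e
    · simp [pvAltGo, pvTake, h, not_lt.mpr h]
    · have hlt : pvStep e < pvStep r := lt_of_not_ge h
      simp [pvAltGo, pvTake, h, hlt, ih]

theorem pvAlt_snoc (ys : List (List (String × Int))) (e : List (String × Int)) :
    latest_run_evals_alt (ys ++ [e]) = (pvTake ys.reverse e).reverse ++ [e] := by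
  simp [latest_run_evals_alt, pvAltGo, pvAltGo_eq]

theorem pvCur_snoc (ys : List (List (String × Int))) (e : List (String × Int)) :
    ((ys ++ [e]).foldl pvF ([], [])).2 = (pvTake ys.reverse e).reverse ++ [e] := by
  induction ys using List.reverseRecOn generalizing e with
  | nil => simp [pvF, pvTake]
  | append_singleton zs f ih =>
    have hcur : ((zs ++ [f]).foldl pvF ([], [])).2 = (pvTake zs.reverse f).reverse ++ [f] := ih f
    rw [show zs ++ [f] ++ [e] = (zs ++ [f]) ++ [e] from rfl, List.foldl_append,
      List.foldl_cons, List.foldl_nil]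
    generalize hs : List.foldl pvF ([], []) (zs ++ [f]) = s at hcur
    have hne : s.2 ≠ [] := by rw [hcur]; simp
    have hlast : s.2.getLast! = f := by rw [hcur]; exact pvLast_concat _ f
    have hrev : (zs ++ [f]).reverse = f :: zs.reverse := by simp
    by_cases h : pvStep e ≤ pvStep f
    · simp only [pvF]
      rw [if_pos ⟨hne, by rw [hlast]; simpa using h⟩]
      simp [hrev, pvTake, not_lt.mpr h]
    · simp only [pvF]
      rw [if_neg (by rw [hlast]; simp; intro _; simpa using lt_of_not_ge h)]
      simp [hrev, pvTake, lt_of_not_ge h, hcur]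

theorem pvA_snoc (ys : List (List (String × Int))) (e : List (String × Int)) :
    latest_run_evals (ys ++ [e]) = (pvTake ys.reverse e).reverse ++ [e] := by
  have hcur := pvCur_snoc ys e
  simp only [latest_run_evals]
  generalize hs : List.foldl pvF ([], []) (ys ++ [e]) = p at hcur
  have hne : p.2 ≠ [] := by rw [hcur]; simp
  rw [if_pos hne, if_pos (by simp : p.1 ++ [p.2] ≠ []), pvLast_concat, hcur]

-- ===== VERDICT (by name: the statement is the Claim_ definition above) =====
theorem latest_run_evals_spec : Claim_equal_latest_run_evals := by
  intro evals _ _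
  unfold Spec_latest_run_evals
  induction evals using List.reverseRecOn with
  | nil => decide
  | append_singleton ys e _ => rw [pvA_snoc, pvAlt_snoc]
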